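-- pv_equiv track=rewrite | github.com/neoboid/git-p4son | git_p4son/changelist.py | replace_description_in_spec
-- ===== SOURCE A (Python) =====
-- def replace_description_in_spec(spec_text: str, new_description: str) -> str:
--     """
--     Replace the Description field in a p4 changelist spec.
--
--     Args:
--         spec_text: The full spec text from p4 change -o
--         new_description: The new description string
--
--     Returns:
--         The spec text with the description replaced.
--     """
--     lines = spec_text.splitlines()
--     result_lines = []
--     in_description = False
--     description_replaced = False
--     for line in lines:
--         if line.startswith('Description:'):
--             in_description = True
--             result_lines.append(line)
--             # Add new description lines, tab-indented
--             for desc_line in new_description.splitlines():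
--                 result_lines.append('\t' + desc_line)
--             description_replaced = True
--             continue
--         if in_description:
--             if line.startswith('\t'):
--                 continue  # skip old description lines
--             else:
--                 in_description = False
--                 result_lines.append(line)
--         else:
--             result_lines.append(line)
--     return '\n'.join(result_lines) + '\n'
-- ===== SOURCE B (Python) =====
-- def replace_description_in_spec(spec_text: str, new_description: str) -> str:
--     """
--     Replace the Description field in a p4 changelist spec.
--
--     Staged approach: group the lines into blocks (a block = a line plus the
--     tab-indented continuation lines that follow it), then rewrite each block
--     whose header is 'Description:' and flatten the blocks back into text.
--     """
--     blocks = []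
--     for line in spec_text.splitlines():
--         if line.startswith('\t') and blocks:
--             blocks[-1].append(line)
--         else:
--             blocks.append([line])
--     new_block = ['\t' + d for d in new_description.splitlines()]
--     out = []
--     for block in blocks:
--         if block[0].startswith('Description:'):
--             out.append(block[0])
--             out.extend(new_block)
--         else:
--             out.extend(block)
--     return '\n'.join(out) + '\n'
-- ===== Notes on version B (the rewrite author's own statement) =====
-- stated objective: alternative
-- what changed: Replaces A's single-pass state machine carrying in_description/description_replaced flags by a staged group/map/flatten pipeline: lines are first grouped into header-plus-tab-continuation blocks, then each Description block is rewritten and the blocks are flattened.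
import Mathlib
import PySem

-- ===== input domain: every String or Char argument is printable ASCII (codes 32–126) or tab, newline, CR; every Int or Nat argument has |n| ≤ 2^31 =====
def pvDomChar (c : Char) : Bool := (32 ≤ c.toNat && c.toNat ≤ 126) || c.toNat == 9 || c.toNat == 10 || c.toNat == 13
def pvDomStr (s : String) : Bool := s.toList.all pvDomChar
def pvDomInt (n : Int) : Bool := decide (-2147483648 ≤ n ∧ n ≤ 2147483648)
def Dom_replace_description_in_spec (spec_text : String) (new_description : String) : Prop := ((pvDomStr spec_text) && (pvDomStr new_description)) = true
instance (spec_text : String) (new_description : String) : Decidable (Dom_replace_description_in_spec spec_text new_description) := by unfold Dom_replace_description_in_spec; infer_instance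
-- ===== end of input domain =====

-- B replaces A's single-pass state machine (in_description/description_replaced flags) by a
-- staged pipeline: group lines into header-plus-tab-continuation blocks, rewrite the
-- Description blocks, flatten (objective: alternative decomposition, same cost).

-- ===== PORT A =====
-- state = (result_lines, in_description, description_replaced); one Python loop iteration
def pvAStep (new_description : String) (st : List String × Bool × Bool) (line : String) :
    List String × Bool × Bool :=
  let result_lines := st.1
  let in_description := st.2.1
  let description_replaced := st.2.2
  if PySem.Str.startswith line "Description:" then
    (result_lines ++ [line] ++ (PySem.Str.splitlines new_description).map (fun d => "\t" ++ d),
     true, true)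
  else if in_description then
    if PySem.Str.startswith line "\t" then
      (result_lines, in_description, description_replaced)  -- continue: skip old description line
    else
      (result_lines ++ [line], false, description_replaced)
  else
    (result_lines ++ [line], in_description, description_replaced)

def replace_description_in_spec (spec_text : String) (new_description : String) : String :=
  let lines := PySem.Str.splitlines spec_text
  let final := lines.foldl (pvAStep new_description) ([], false, false)
  PySem.Str.join "\n" final.1 ++ "\n"

-- ===== PORT B =====
-- 'if line.startswith("\t") and blocks: blocks[-1].append(line) else: blocks.append([line])'
def pvGroupStep (blocks : List (List String)) (line : String) : List (List String) :=
  if PySem.Str.startswith line "\t" && !blocks.isEmpty then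
    blocks.dropLast ++ [blocks.getLastD [] ++ [line]]
  else
    blocks ++ [[line]]

-- the second loop's body: emit the block, rewriting Description blocks
def pvEmit (new_block : List String) (out : List String) (block : List String) : List String :=
  if PySem.Str.startswith (block.headD "") "Description:" then
    out ++ (block.headD "" :: new_block)
  else
    out ++ block

def replace_description_in_spec_alt (spec_text : String) (new_description : String) : String :=
  let blocks := (PySem.Str.splitlines spec_text).foldl pvGroupStep []
  let new_block := (PySem.Str.splitlines new_description).map (fun d => "\t" ++ d)
  let out := blocks.foldl (pvEmit new_block) []
  PySem.Str.join "\n" out ++ "\n"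

-- ===== PRECONDITION & SPEC =====
def Spec_replace_description_in_spec (spec_text : String) (new_description : String) (out : String) : Prop := out = replace_description_in_spec_alt spec_text new_description
instance (spec_text : String) (new_description : String) (out : String) : Decidable (Spec_replace_description_in_spec spec_text new_description out) := by unfold Spec_replace_description_in_spec; infer_instance

-- ===== CLAIM (what is proved, stated in full; the proofs are below) =====
def Claim_equal_replace_description_in_spec : Prop := ∀ (spec_text : String) (new_description : String), Dom_replace_description_in_spec spec_text new_description → Spec_replace_description_in_spec spec_text new_description (replace_description_in_spec spec_text new_description)

-- ===== LEMMAS AND PROOFS =====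

-- a line starting with 'Description:' does not start with a tab
theorem pvHeader_not_tab (line : String) (h : PySem.Str.startswith line "Description:" = true) :
    PySem.Str.startswith line "\t" = false := by
  simp only [PySem.Str.startswith_eq] at *
  rw [PySem.Chars.startswith_iff] at h
  obtain ⟨t, ht⟩ := h
  by_contra hc
  rw [Bool.not_eq_false, PySem.Chars.startswith_iff] at hc
  obtain ⟨u, hu⟩ := hc
  rw [← ht] at hu
  simp at hu

-- structural form of the grouping pass, for the proofs
def pvGrpS : List String → List (List String)
  | [] => []
  | l :: ls =>
      (l :: ls.takeWhile (fun t => PySem.Str.startswith t "\t"))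
        :: pvGrpS (ls.dropWhile (fun t => PySem.Str.startswith t "\t"))
termination_by ls => ls.length
decreasing_by
  exact Nat.lt_succ_of_le (List.length_dropWhile_le ..)

-- block rewriting as a plain function
def pvF (new_block : List String) (block : List String) : List String :=
  if PySem.Str.startswith (block.headD "") "Description:" then
    block.headD "" :: new_block
  else
    block

theorem pvEmit_eq (nb out block : List String) : pvEmit nb out block = out ++ pvF nb block := by
  unfold pvEmit pvF; split <;> rfl

-- the grouping fold with a nonempty accumulator grows the last block by the leading tab lines
theorem pvGroup_inv :
    ∀ (ls : List String) (bs : List (List String)) (cur : List String),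
      List.foldl pvGroupStep (bs ++ [cur]) ls
        = bs ++ (cur ++ ls.takeWhile (fun t => PySem.Str.startswith t "\t"))
            :: pvGrpS (ls.dropWhile (fun t => PySem.Str.startswith t "\t")) := by
  intro ls
  induction ls with
  | nil => intro bs cur; simp [pvGrpS]
  | cons l ls ih =>
    intro bs cur
    by_cases ht : PySem.Str.startswith l "\t" = true
    · have ht' : PySem.Chars.startswith l.toList ['\t'] = true := by simpa using ht
      rw [List.foldl_cons]
      have hstep : pvGroupStep (bs ++ [cur]) l = bs ++ [cur ++ [l]] := by
        simp [pvGroupStep, ht']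
      rw [hstep, ih bs (cur ++ [l])]
      simp [ht']
    · have ht' : PySem.Chars.startswith l.toList ['\t'] = false := by
        simpa using (Bool.not_eq_true _).mp ht
      rw [List.foldl_cons]
      have hstep : pvGroupStep (bs ++ [cur]) l = (bs ++ [cur]) ++ [[l]] := by
        simp [pvGroupStep, ht']
      rw [hstep, ih (bs ++ [cur]) [l]]
      simp [pvGrpS, ht']

theorem pvGroup_eq (lines : List String) :
    List.foldl pvGroupStep [] lines = pvGrpS lines := by
  cases lines with
  | nil => simp [pvGrpS]
  | cons l ls =>
    rw [List.foldl_cons]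
    have hstep : pvGroupStep [] l = [] ++ [[l]] := by
      simp [pvGroupStep]
    rw [hstep, pvGroup_inv ls [] [l]]
    simp [pvGrpS]

-- A's loop in the in_description = true state behaves like the false state after dropping
-- the leading tab lines (those are skipped without touching the accumulator).
theorem pvFold_true_eq_drop (nd : String) :
    ∀ (lines : List String) (acc : List String) (r : Bool),
      (List.foldl (pvAStep nd) (acc, true, r) lines).1
        = (List.foldl (pvAStep nd) (acc, false, r)
            (lines.dropWhile (fun t => PySem.Str.startswith t "\t"))).1 := by
  intro lines
  induction lines with
  | nil => intro acc r; simp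
  | cons line rest ih =>
    intro acc r
    by_cases hd : PySem.Str.startswith line "Description:" = true
    · have ht := pvHeader_not_tab line hd
      simp at hd ht
      simp [ht, List.foldl_cons, pvAStep, hd]
    · by_cases ht : PySem.Str.startswith line "\t" = true
      · simp at hd ht
        simpa [ht, List.foldl_cons, pvAStep, hd] using ih acc r
      · simp at hd ht
        simp [ht, List.foldl_cons, pvAStep, hd]

-- A's loop in the false state appends a run of tab lines unchanged
theorem pvFold_false_tabs (nd : String) :
    ∀ (ts : List String), (∀ t ∈ ts, PySem.Str.startswith t "\t" = true) →
      ∀ (rest : List String) (acc : List String) (r : Bool),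
        List.foldl (pvAStep nd) (acc, false, r) (ts ++ rest)
          = List.foldl (pvAStep nd) (acc ++ ts, false, r) rest := by
  intro ts
  induction ts with
  | nil => intro _ rest acc r; simp
  | cons t ts ih =>
    intro hall rest acc r
    have ht : PySem.Str.startswith t "\t" = true := hall t (by simp)
    have hd : PySem.Str.startswith t "Description:" = false := by
      cases hcc : PySem.Str.startswith t "Description:" with
      | false => rfl
      | true => rw [pvHeader_not_tab t hcc] at ht; exact absurd ht (by simp)
    have hstep : pvAStep nd (acc, false, r) t = (acc ++ [t], false, r) := by
      have hd' : PySem.Chars.startswith t.toList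
          ['D', 'e', 's', 'c', 'r', 'i', 'p', 't', 'i', 'o', 'n', ':'] = false := by
        simpa using hd
      simp [pvAStep, hd']
    rw [List.cons_append, List.foldl_cons, hstep,
        ih (fun x hx => hall x (by simp [hx])) rest (acc ++ [t]) r]
    simp

-- A's loop in the false state computes B's block pipeline
theorem pvA_eq_flat (nd : String) :
    ∀ (n : Nat) (lines : List String), lines.length ≤ n →
      ∀ (acc : List String) (r : Bool),
        (List.foldl (pvAStep nd) (acc, false, r) lines).1
          = acc ++ ((pvGrpS lines).map
              (pvF ((PySem.Str.splitlines nd).map (fun d => "\t" ++ d)))).flatten := by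
  intro n
  induction n with
  | zero =>
    intro lines hlen acc r
    have : lines = [] := List.eq_nil_of_length_eq_zero (Nat.le_zero.mp hlen)
    subst this; simp [pvGrpS]
  | succ n ih =>
    intro lines hlen acc r
    cases lines with
    | nil => simp [pvGrpS]
    | cons line rest =>
      simp only [List.length_cons, Nat.succ_le_succ_iff] at hlen
      by_cases hd : PySem.Str.startswith line "Description:" = true
      · have hd' : PySem.Chars.startswith line.toList
            ['D', 'e', 's', 'c', 'r', 'i', 'p', 't', 'i', 'o', 'n', ':'] = true := by
          simpa using hd
        rw [List.foldl_cons]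
        simp only [pvAStep, if_pos hd]
        rw [pvFold_true_eq_drop nd rest]
        rw [ih _ (le_trans (List.length_dropWhile_le ..) hlen)]
        simp [pvGrpS, pvF, hd']
      · rw [List.foldl_cons]
        simp only [pvAStep, if_neg hd, Bool.false_eq_true, if_false]
        rw [← List.takeWhile_append_dropWhile
              (p := fun t => PySem.Str.startswith t "\t") (l := rest)]
        rw [pvFold_false_tabs nd _
              (fun t htm => List.mem_takeWhile_imp (p := fun t => PySem.Str.startswith t "\t") htm)
              _ _ r]
        rw [ih _ (le_trans (List.length_dropWhile_le ..) hlen)]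
        have hd' : PySem.Chars.startswith line.toList
            ['D', 'e', 's', 'c', 'r', 'i', 'p', 't', 'i', 'o', 'n', ':'] = false := by
          simpa using (Bool.not_eq_true _).mp hd
        simp [pvGrpS, pvF, hd']

-- ===== VERDICT (by name: the statement is the Claim_ definition above) =====
theorem replace_description_in_spec_spec : Claim_equal_replace_description_in_spec := by
  intro spec_text new_description _
  unfold Spec_replace_description_in_spec replace_description_in_spec replace_description_in_spec_alt
  have hA := pvA_eq_flat new_description (PySem.Str.splitlines spec_text).length
    (PySem.Str.splitlines spec_text) le_rfl [] false
  simp only [List.nil_append] at hA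
  have hB : (List.foldl pvGroupStep [] (PySem.Str.splitlines spec_text)).foldl
      (pvEmit ((PySem.Str.splitlines new_description).map (fun d => "\t" ++ d))) []
      = ((pvGrpS (PySem.Str.splitlines spec_text)).map
          (pvF ((PySem.Str.splitlines new_description).map (fun d => "\t" ++ d)))).flatten := by
    rw [pvGroup_eq]
    have : ∀ (bs acc : List (List String)) (nb : List String),
        (bs : List (List String)).foldl (pvEmit nb) acc.flatten
          = acc.flatten ++ (bs.map (pvF nb)).flatten := by
      intro bs
      induction bs with
      | nil => intro acc nb; simp
      | cons b bs ihb =>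
        intro acc nb
        rw [List.foldl_cons, pvEmit_eq]
        have := ihb (acc ++ [pvF nb b]) nb
        simp at this ⊢
        rw [← this]
    simpa using this (pvGrpS (PySem.Str.splitlines spec_text)) [] _
  simp only [hA, hB]
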